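-- pv_equiv track=rewrite | github.com/CronJorian/project_euler | python/problem_35.py | getCircularNumbers
-- ===== SOURCE A (Python) =====
-- def getCircularNumbers(number):
--     numbers = [number]
--     number = str(number)
--
--     for _ in range(1, len(number)):
--         letter = number[0]
--         number = number[1::] + letter
--         numbers.append(int(number))
--     return numbers
-- ===== SOURCE B (Python) =====
-- def getCircularNumbers(number):
--     s = str(number)
--
--     def rots(pre, suf):
--         if not suf:
--             return []
--         return [suf + pre] + rots(pre + suf[0], suf[1:])
--
--     return [number] + [int(r) for r in rots(s[:1], s[1:])]
-- ===== Notes on version B (the rewrite author's own statement) =====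
-- stated objective: alternative
-- what changed: B generates the rotation strings by recursion over a growing-prefix/shrinking-suffix pair of buffers (consing each result) and then converts them to ints in a separate second pass, instead of A's single loop that repeatedly mutates one string (peel first char, append it) and appends int() results to an accumulator as it goes.
import Mathlib
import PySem

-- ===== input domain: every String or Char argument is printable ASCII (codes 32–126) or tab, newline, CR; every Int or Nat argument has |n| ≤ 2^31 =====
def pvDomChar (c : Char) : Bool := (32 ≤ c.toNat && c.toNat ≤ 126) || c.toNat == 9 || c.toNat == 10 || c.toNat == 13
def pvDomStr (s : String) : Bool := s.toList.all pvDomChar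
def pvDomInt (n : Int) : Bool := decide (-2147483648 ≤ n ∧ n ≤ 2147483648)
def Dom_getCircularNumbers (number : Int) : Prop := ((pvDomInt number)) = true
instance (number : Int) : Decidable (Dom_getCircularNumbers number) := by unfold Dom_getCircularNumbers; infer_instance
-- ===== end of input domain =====

-- B generates the rotation strings by recursion over a prefix/suffix pair of buffers
-- and converts them in a separate pass, instead of A's single loop that mutates one
-- string and appends int() results as it goes; same cost, a different decomposition.

-- ===== PORT A =====
def getCircularNumbers (number : Int) : List Int :=
  let numbers : List Int := [number]
  let s := PySem.Int.toChars number
  ((PySem.List.pyRange 1 (PySem.List.len s) 1).foldl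
    (fun (st : List Int × List Char) _ =>
      let letter := (PySem.List.pyGet? st.2 0).getD ' '
      let cur := PySem.List.slice st.2 (some 1) none ++ [letter]
      (st.1 ++ [(PySem.Int.ofChars? cur).getD 0], cur))
    (numbers, s)).1

-- ===== PORT B =====
-- Source B's rots(pre, suf): 'if not suf' is the [] case; 'suf[0]'/'suf[1:]' are the
-- matched head/tail of the nonempty suffix.
def pvRotsB : List Char → List Char → List (List Char)
  | _, [] => []
  | pre, c :: t => ((c :: t) ++ pre) :: pvRotsB (pre ++ [c]) t

def getCircularNumbers_alt (number : Int) : List Int :=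
  let s := PySem.Int.toChars number
  [number] ++ (pvRotsB (PySem.List.slice s none (some 1))
                       (PySem.List.slice s (some 1) none)).map
    (fun r => (PySem.Int.ofChars? r).getD 0)

-- ===== PRECONDITION & SPEC =====
-- Pre_ excludes negative numbers: there str(number) starts with '-', every rotation
-- moves the sign into the digits and int(...) raises ValueError in both programs.
def Pre_getCircularNumbers (number : Int) : Prop := 0 ≤ number
instance (number : Int) : Decidable (Pre_getCircularNumbers number) := by unfold Pre_getCircularNumbers; infer_instance
def pvWitness_getCircularNumbers : Int := (197)
def Spec_getCircularNumbers (number : Int) (out : List Int) : Prop := out = getCircularNumbers_alt number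
instance (number : Int) (out : List Int) : Decidable (Spec_getCircularNumbers number out) := by unfold Spec_getCircularNumbers; infer_instance

-- ===== CLAIM (what is proved, stated in full; the proofs are below) =====
def Claim_equal_getCircularNumbers : Prop := ∀ (number : Int), Dom_getCircularNumbers number → Pre_getCircularNumbers number → Spec_getCircularNumbers number (getCircularNumbers number)

-- ===== LEMMAS AND PROOFS =====

-- the int value A/B append for the rotation by k
def pvItv (s : List Char) (k : Nat) : Int :=
  (PySem.Int.ofChars? (s.drop k ++ s.take k)).getD 0

-- A's loop body, abstracted
def pvStep (st : List Int × List Char) (_ : Int) : List Int × List Char :=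
  let letter := (PySem.List.pyGet? st.2 0).getD ' '
  let cur := PySem.List.slice st.2 (some 1) none ++ [letter]
  (st.1 ++ [(PySem.Int.ofChars? cur).getD 0], cur)

lemma pvStep_rot (s : List Char) (k : Nat) (hk : k < s.length) (acc : List Int) :
    pvStep (acc, s.drop k ++ s.take k) 0
      = (acc ++ [pvItv s (k + 1)], s.drop (k + 1) ++ s.take (k + 1)) := by
  have hd : s.drop k = s[k] :: s.drop (k + 1) := List.drop_eq_getElem_cons hk
  have hget : (PySem.List.pyGet? (s.drop k ++ s.take k) 0).getD ' ' = s[k] := by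
    rw [show (0:Int) = ((0:Nat):Int) from rfl, PySem.List.pyGet?_natCast, hd]; rfl
  have htail : PySem.List.slice (s.drop k ++ s.take k) (some 1) none
      = s.drop (k + 1) ++ s.take k := by
    rw [PySem.List.slice_from_one, hd, List.cons_append, List.tail_cons]
  have hca : (s.drop (k + 1) ++ s.take k) ++ [s[k]] = s.drop (k + 1) ++ s.take (k + 1) := by
    rw [List.append_assoc, List.take_append_getElem hk]
  simp only [pvStep, hget, htail, hca, pvItv]

lemma pvLoop (s : List Char) (r : List Int) : ∀ (k : Nat) (acc : List Int),
    k + r.length ≤ s.length →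
    r.foldl pvStep (acc, s.drop k ++ s.take k)
      = (acc ++ (List.range r.length).map (fun j => pvItv s (k + 1 + j)),
         s.drop (k + r.length) ++ s.take (k + r.length)) := by
  induction r with
  | nil => intro k acc _; simp
  | cons x t ih =>
    intro k acc h
    have hk : k < s.length := by simp at h; omega
    rw [List.foldl_cons]
    have hx : pvStep (acc, s.drop k ++ s.take k) x
        = (acc ++ [pvItv s (k + 1)], s.drop (k + 1) ++ s.take (k + 1)) := by
      have := pvStep_rot s k hk acc
      simpa [pvStep] using this
    rw [hx, ih (k + 1) _ (by simp at h ⊢; omega)]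
    have hn : k + 1 + t.length = k + (x :: t).length := by simp; omega
    simp only [List.length_cons, List.range_succ_eq_map, List.map_cons, List.map_map,
      Prod.mk.injEq, hn]
    refine ⟨?_, trivial⟩
    rw [List.append_assoc, List.singleton_append, Nat.add_zero]
    congr 1
    congr 1
    apply List.map_congr_left
    intro j _
    simp only [Function.comp_apply]
    congr 1
    omega

-- B's recursion, run on (take k, drop k), yields exactly the rotations k, k+1, …
lemma pvRotsB_spec (s : List Char) (m : Nat) : ∀ (k : Nat), k + m = s.length →
    pvRotsB (s.take k) (s.drop k)
      = (List.range m).map (fun j => s.drop (k + j) ++ s.take (k + j)) := by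
  induction m with
  | zero =>
    intro k hk
    have : s.drop k = [] := List.drop_eq_nil_of_le (by omega)
    simp [this, pvRotsB]
  | succ m ih =>
    intro k hk
    have hklt : k < s.length := by omega
    have hd : s.drop k = s[k] :: s.drop (k + 1) := List.drop_eq_getElem_cons hklt
    have hpre : s.take k ++ [s[k]] = s.take (k + 1) := List.take_append_getElem hklt
    rw [hd]
    show ((s[k] :: s.drop (k + 1)) ++ s.take k) ::
        pvRotsB (s.take k ++ [s[k]]) (s.drop (k + 1)) = _
    rw [hpre, ih (k + 1) (by omega), ← hd]
    rw [List.range_succ_eq_map, List.map_cons, List.map_map]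
    simp only [Nat.add_zero, List.cons.injEq]
    refine ⟨trivial, ?_⟩
    apply List.map_congr_left
    intro j _
    simp only [Function.comp_apply]
    congr 2 <;> omega

-- ===== VERDICT (by name: the statement is the Claim_ definition above) =====
theorem getCircularNumbers_spec : Claim_equal_getCircularNumbers := by
  intro number _ _
  unfold Spec_getCircularNumbers
  show ((PySem.List.pyRange 1 (PySem.List.len (PySem.Int.toChars number)) 1).foldl pvStep
      ([number], PySem.Int.toChars number)).1
    = [number] ++ (pvRotsB (PySem.List.slice (PySem.Int.toChars number) none (some 1))
                           (PySem.List.slice (PySem.Int.toChars number) (some 1) none)).map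
      (fun r => (PySem.Int.ofChars? r).getD 0)
  set s := PySem.Int.toChars number with hs
  have hlen : PySem.List.len s = (s.length : Int) := by simp [PySem.List.len_eq]
  have hr : (PySem.List.pyRange 1 (PySem.List.len s) 1).length = (PySem.List.len s - 1).toNat := by
    rw [PySem.List.pyRange_one]; simp
  have hfold := pvLoop s (PySem.List.pyRange 1 (PySem.List.len s) 1) 0 [number]
    (by rw [hr, hlen]; omega)
  simp only [Nat.zero_add, List.drop_zero, List.take_zero, List.append_nil] at hfold
  rw [hfold]
  have hs1 : PySem.List.slice s none (some 1) = s.take 1 := by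
    rw [show (1:Int) = ((1:Nat):Int) from rfl, PySem.List.slice_to_natCast]
  have hs2 : PySem.List.slice s (some 1) none = s.drop 1 := by
    rw [PySem.List.slice_from_one, ← List.drop_one]
  rw [hs1, hs2]
  rcases Nat.eq_zero_or_pos s.length with h0 | hpos
  · have hnil : s = [] := List.eq_nil_of_length_eq_zero h0
    simp [hnil, pvRotsB]
  · have hm : 1 + (s.length - 1) = s.length := by omega
    rw [pvRotsB_spec s (s.length - 1) 1 hm, List.map_map]
    have hcount : (PySem.List.len s - 1).toNat = s.length - 1 := by rw [hlen]; omega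
    rw [hr, hcount]
    congr 1
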